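-- pv_equiv track=rewrite | github.com/argon17/LeetCodeDC | smallestStringWithAGivenNumericValue.py | getSmallestString
-- ===== SOURCE A (Python) =====
-- def getSmallestString(n: int, k: int) -> str:
--     ans = ['a'] * n
--     k -= 1 * n
--     for i in range(n):
--         if k:
--             ans[i] = chr(97 + min(k, 25))
--             k -= min(k, 25)
--         else:
--             break
--     return ''.join(reversed(ans))
-- ===== SOURCE B (Python) =====
-- def getSmallestString(n: int, k: int) -> str:
--     # Each position's letter follows directly from a formula: distributing
--     # r = k - n greedily onto the front cells gives cell i the extra value
--     # clamp(r - 25*i, 0, 25).  Emit the cells back to front.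
--     r = k - n
--     return ''.join(chr(97 + min(max(r - 25 * i, 0), 25)) for i in range(n - 1, -1, -1))
-- ===== Notes on version B (the rewrite author's own statement) =====
-- stated objective: alternative
-- what changed: Replaces the stateful greedy loop (build a mutable n-list, spend min(k,25) per cell until the budget is gone, then reverse and join) by a stateless per-position closed form: cell i's letter is chr(97 + clamp((k-n) - 25*i, 0, 25)), emitted back to front in a single comprehension.
-- intended difference: When 0 < n and -97 <= k-n < 0 (numeric value too small for the length), A stuffs the negative remainder into one cell and returns a string containing the non-letter chr(97+(k-n)); B's clamp yields the all-'a' string, the smallest valid string of that length, which is the intended kind of output. — e.g. on getSmallestString(2, 1): A returns "a`", B returns "aa"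
import Mathlib
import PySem

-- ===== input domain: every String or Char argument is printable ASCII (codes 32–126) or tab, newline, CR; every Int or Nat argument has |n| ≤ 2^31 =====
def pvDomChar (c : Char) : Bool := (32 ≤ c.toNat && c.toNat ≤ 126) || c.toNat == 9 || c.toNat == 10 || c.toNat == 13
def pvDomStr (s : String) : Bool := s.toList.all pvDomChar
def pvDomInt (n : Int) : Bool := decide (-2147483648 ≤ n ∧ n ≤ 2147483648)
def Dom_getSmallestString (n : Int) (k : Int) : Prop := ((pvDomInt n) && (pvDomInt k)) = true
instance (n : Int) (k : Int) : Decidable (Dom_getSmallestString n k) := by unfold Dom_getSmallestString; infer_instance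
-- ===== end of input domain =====

-- B replaces A's stateful greedy loop by a stateless per-position closed form (clamp((k-n)-25i,0,25) per cell, emitted back to front); equal wherever A returns a letter string, D_ marks the deficit corner where A emits a non-letter character and B returns all-'a'.


-- ===== PORT A =====
-- the for-loop with break: fuel = remaining iterations, i = current index, ans mutated via List.set
-- chr(97 + min(k,25)) ported as Char.ofNat (…).toNat: exact whenever the argument is in [0, 0xD800); inside Pre_ it is in [0,122]
def getSmallestStringLoop : Nat → Nat → List Char → Int → List Char
  | 0, _, ans, _ => ans
  | fuel + 1, i, ans, k =>
    if k ≠ 0 then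
      getSmallestStringLoop fuel (i + 1) (ans.set i (Char.ofNat (97 + min k 25).toNat)) (k - min k 25)
    else ans

def getSmallestString (n : Int) (k : Int) : String :=
  let ans := List.replicate n.toNat 'a'
  let k := k - 1 * n
  String.ofList (getSmallestStringLoop n.toNat 0 ans k).reverse

-- ===== PORT B =====
def getSmallestString_alt (n : Int) (k : Int) : String :=
  -- r = k - n inlined; ''.join over range(n-1, -1, -1)
  String.ofList ((PySem.List.pyRange (n - 1) (-1) (-1)).map
    (fun i => Char.ofNat (97 + min (max ((k - n) - 25 * i) 0) 25).toNat))

-- ===== PRECONDITION & SPEC =====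
-- Pre_ excludes exactly the inputs where A raises: k - n < -97 with n > 0 makes chr(97+(k-n))
-- raise ValueError. Everywhere A returns a value, Pre_ holds.
def Pre_getSmallestString (n : Int) (k : Int) : Prop := -97 ≤ k - n ∨ n ≤ 0
instance (n : Int) (k : Int) : Decidable (Pre_getSmallestString n k) := by unfold Pre_getSmallestString; infer_instance
def pvWitness_getSmallestString : Int × Int := (3, 27)

-- When 0 < n and -97 ≤ k-n < 0 (numeric value too small for the length), A stuffs the negative
-- remainder into one cell and returns a string containing the non-letter chr(97+(k-n)); B's clamp
-- yields the all-'a' string, the smallest valid string of that length, which is the intended kind of output.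
def D_getSmallestString (n : Int) (k : Int) : Prop := 0 < n ∧ -97 ≤ k - n ∧ k - n < 0
instance (n : Int) (k : Int) : Decidable (D_getSmallestString n k) := by unfold D_getSmallestString; infer_instance

def Spec_getSmallestString (n : Int) (k : Int) (out : String) : Prop := ¬ D_getSmallestString n k → out = getSmallestString_alt n k
instance (n : Int) (k : Int) (out : String) : Decidable (Spec_getSmallestString n k out) := by unfold Spec_getSmallestString; infer_instance

def pvDiffWitness_getSmallestString : Int × Int := (2, 1)
def pvDiffWitnessOut_getSmallestString : String × String := ("a`", "aa")

-- ===== CLAIM (what is proved, stated in full; the proofs are below) =====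
def Claim_unchanged_getSmallestString : Prop := ∀ (n : Int) (k : Int), Dom_getSmallestString n k → Pre_getSmallestString n k → Spec_getSmallestString n k (getSmallestString n k)
def Claim_changed_getSmallestString : Prop := Dom_getSmallestString (pvDiffWitness_getSmallestString.1) (pvDiffWitness_getSmallestString.2) ∧ Pre_getSmallestString (pvDiffWitness_getSmallestString.1) (pvDiffWitness_getSmallestString.2) ∧ D_getSmallestString (pvDiffWitness_getSmallestString.1) (pvDiffWitness_getSmallestString.2) ∧ getSmallestString (pvDiffWitness_getSmallestString.1) (pvDiffWitness_getSmallestString.2) = pvDiffWitnessOut_getSmallestString.1 ∧ getSmallestString_alt (pvDiffWitness_getSmallestString.1) (pvDiffWitness_getSmallestString.2) = pvDiffWitnessOut_getSmallestString.2 ∧ pvDiffWitnessOut_getSmallestString.1 ≠ pvDiffWitnessOut_getSmallestString.2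
def Claim_exact_getSmallestString : Prop := ∀ (n : Int) (k : Int), Dom_getSmallestString n k → Pre_getSmallestString n k → D_getSmallestString n k → getSmallestString n k ≠ getSmallestString_alt n k
-- ===== LEMMAS AND PROOFS =====

-- the per-position formula of B, over a Nat index
def pvCell (r : Int) (i : Nat) : Char := Char.ofNat (97 + min (max (r - 25 * i) 0) 25).toNat

-- Core invariant: for a nonnegative budget r, A's loop over m fresh 'a'-cells starting at
-- index pre.length writes exactly B's per-position formula into each cell.
theorem getSmallestStringLoop_eq_map (m : Nat) : ∀ (pre : List Char) (r : Int), 0 ≤ r →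
    getSmallestStringLoop m pre.length (pre ++ List.replicate m 'a') r =
      pre ++ (List.range m).map (pvCell r) := by
  induction m with
  | zero => intro pre r _; simp [getSmallestStringLoop]
  | succ m ih =>
    intro pre r hr
    by_cases h0 : r = 0
    · subst h0
      have : (List.range (m + 1)).map (pvCell 0) = List.replicate (m + 1) 'a' := by
        rw [List.eq_replicate_iff]
        refine ⟨by simp, ?_⟩
        intro c hc
        obtain ⟨i, _, rfl⟩ := List.mem_map.mp hc
        unfold pvCell
        have h1 : max ((0:Int) - 25 * (i : Int)) 0 = 0 := by
          have h2 : (0:Int) ≤ 25 * (i : Int) := by positivity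
          omega
        rw [h1]
        decide
      rw [this]
      simp [getSmallestStringLoop]
    · have hset : (pre ++ List.replicate (m + 1) 'a').set pre.length
          (Char.ofNat (97 + min r 25).toNat) =
          (pre ++ [Char.ofNat (97 + min r 25).toNat]) ++ List.replicate m 'a' := by
        rw [List.replicate_succ, List.set_append_right _ _ (le_refl _)]
        simp
      simp only [getSmallestStringLoop, if_pos h0, hset]
      rw [show pre.length + 1 = (pre ++ [Char.ofNat (97 + min r 25).toNat]).length by simp]
      rw [ih _ (r - min r 25) (by omega)]
      have hhead : pvCell r 0 = Char.ofNat (97 + min r 25).toNat := by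
        simp only [pvCell, Nat.cast_zero, mul_zero, sub_zero]
        have : max r 0 = r := by omega
        rw [this]
      have htail : ∀ i ∈ List.range m, pvCell (r - min r 25) i = pvCell r (i + 1) := by
        intro i _
        have h1 : min (max (r - min r 25 - 25 * i) 0) 25
            = min (max (r - 25 * (i + 1 : Nat)) 0) 25 := by
          by_cases h25 : r ≤ 25
          · have : min r 25 = r := by omega
            rw [this]
            push_cast
            have hx : max (r - r - 25 * i) 0 = 0 := by
              have : (25:Int) * i ≥ 0 := by positivity
              omega
            have hy : max (r - 25 * (i + 1)) 0 = 0 := by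
              have : (25:Int) * i ≥ 0 := by positivity
              omega
            rw [hx, hy]
          · have : min r 25 = 25 := by omega
            rw [this]
            push_cast
            ring_nf
        simp [pvCell, h1]
      rw [List.map_congr_left htail, List.range_succ_eq_map]
      simp [hhead, Function.comp_def]

-- B's range runs n-1, n-2, …, 0: its mapped list is the reverse of the map over List.range
theorem alt_eq_reverse_map (n : Int) (hn : 0 < n) (r : Int) :
    (PySem.List.pyRange (n - 1) (-1) (-1)).map
      (fun i => Char.ofNat (97 + min (max (r - 25 * i) 0) 25).toNat) =
    ((List.range n.toNat).map (pvCell r)).reverse := by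
  have hstep : PySem.List.pyRange (n - 1) (-1) (-1) =
      (List.range n.toNat).map (fun k : Nat => (n - 1) + (-1) * (k : Int)) := by
    unfold PySem.List.pyRange
    have h1 : ¬ ((-1:Int) = 0) := by decide
    have h2 : ¬ ((0:Int) < -1) := by decide
    simp only [if_neg h1, if_neg h2]
    rw [if_pos (by omega : (-1:Int) < n - 1)]
    have hc : ((n - 1 - -1 + - -1 - 1) / - -1).toNat = n.toNat := by norm_num
    rw [hc]
  rw [hstep, List.map_map]
  apply List.ext_getElem
  · simp
  · intro j hj1 hj2
    have hlen : j < n.toNat := by simpa using hj1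
    simp only [List.getElem_map, List.getElem_range, List.getElem_reverse,
      List.length_map, List.length_range, Function.comp_apply]
    have harg : n - 1 + -1 * (j : Int) = ((n.toNat - 1 - j : Nat) : Int) := by omega
    rw [harg]
    rfl

-- deficit regime (used for Claim_exact): r < 0 is spent in full on the first cell, loop stops
theorem getSmallestStringLoop_neg (m : Nat) (k : Int) (hk : k < 0) :
    getSmallestStringLoop (m + 1) 0 (List.replicate (m + 1) 'a') k =
      Char.ofNat (97 + k).toNat :: List.replicate m 'a' := by
  have h0 : k ≠ 0 := by omega
  have hmin : min k 25 = k := by omega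
  simp only [getSmallestStringLoop, if_pos h0, hmin, sub_self]
  rw [List.replicate_succ]
  have hset : (('a' :: List.replicate m 'a').set 0 (Char.ofNat (97 + k).toNat)) =
      Char.ofNat (97 + k).toNat :: List.replicate m 'a' := by simp
  rw [hset]
  cases m <;> simp [getSmallestStringLoop]

theorem alt_all_a (n : Int) (hn : 0 < n) (k : Int) (hk : k - n < 0) :
    getSmallestString_alt n k = String.ofList (List.replicate n.toNat 'a') := by
  unfold getSmallestString_alt
  rw [alt_eq_reverse_map n hn (k - n)]
  congr 1
  have : (List.range n.toNat).map (pvCell (k - n)) = List.replicate n.toNat 'a' := by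
    rw [List.eq_replicate_iff]
    refine ⟨by simp, ?_⟩
    intro c hc
    obtain ⟨i, _, rfl⟩ := List.mem_map.mp hc
    unfold pvCell
    have h1 : max (k - n - 25 * (i : Int)) 0 = 0 := by
      have h2 : (0:Int) ≤ 25 * (i : Int) := by positivity
      omega
    rw [h1]
    decide
  rw [this]
  simp

theorem getSmallestString_spec_aux (n k : Int) (hr : 0 ≤ k - n ∨ n ≤ 0) :
    getSmallestString n k = getSmallestString_alt n k := by
  unfold getSmallestString getSmallestString_alt
  dsimp only
  rw [one_mul]
  by_cases hn : n ≤ 0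
  · have h0 : n.toNat = 0 := by omega
    have hrange : PySem.List.pyRange (n - 1) (-1) (-1) = [] := by
      unfold PySem.List.pyRange
      have h1 : ¬ ((-1:Int) = 0) := by decide
      have h2 : ¬ ((0:Int) < -1) := by decide
      rw [if_neg h1]
      simp only [if_neg h2]
      rw [if_neg (by omega : ¬ ((-1:Int) < n - 1))]
      simp
    rw [h0, hrange]
    rfl
  · have hn' : 0 < n := by omega
    have hr' : 0 ≤ k - n := by tauto
    have h := getSmallestStringLoop_eq_map n.toNat [] (k - n) hr'
    simp only [List.nil_append, List.length_nil] at h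
    rw [h, alt_eq_reverse_map n hn' (k - n)]

-- ===== VERDICT (by name: the statements are the Claim_ definitions above) =====
theorem getSmallestString_spec : Claim_unchanged_getSmallestString := by
  intro n k _ hpre hnd
  apply getSmallestString_spec_aux
  unfold Pre_getSmallestString at hpre
  unfold D_getSmallestString at hnd
  by_cases hn : n ≤ 0
  · right; exact hn
  · left
    push Not at hnd
    rcases hpre with h | h
    · have := hnd (by omega) h
      omega
    · omega

theorem getSmallestString_changed : Claim_changed_getSmallestString := by
  unfold Claim_changed_getSmallestString; decide

theorem getSmallestString_tight : Claim_exact_getSmallestString := by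
  intro n k _ _ hd
  unfold D_getSmallestString at hd
  obtain ⟨hn, hlo, hhi⟩ := hd
  rw [alt_all_a n hn k hhi]
  unfold getSmallestString
  dsimp only
  rw [one_mul]
  obtain ⟨m, hm⟩ : ∃ m, n.toNat = m + 1 := ⟨n.toNat - 1, by omega⟩
  rw [hm, getSmallestStringLoop_neg m (k - n) hhi]
  intro hEq
  have hlist : (Char.ofNat (97 + (k - n)).toNat :: List.replicate m 'a').reverse =
      List.replicate (m + 1) 'a' := by
    have := congrArg String.toList hEq
    simpa [hm] using this
  rw [List.reverse_cons, List.reverse_replicate, List.replicate_succ'] at hlist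
  have hc : Char.ofNat (97 + (k - n)).toNat = 'a' := by
    have := List.append_cancel_left hlist
    injection this
  have hv : (97 + (k - n)).toNat < 97 := by omega
  have hval : (Char.ofNat (97 + (k - n)).toNat).toNat = (97 + (k - n)).toNat := by
    rw [Char.toNat_ofNat, if_pos (by left; omega)]
  rw [hc] at hval
  simp at hval
  omega
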